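-- pv_equiv track=rewrite | github.com/k-lautenbach/Yelp_NoSQL_Application | category_shift_analysis.py | get_gentrify_scores
-- ===== SOURCE A (Python) =====
-- GENTRIFY_CATS = [
--     "Coffee & Tea", "Cocktail Bars", "Wine Bars", "Wine & Spirits",
--     "Breweries", "Brewpubs", "Beer Bar", "Beer Gardens", "Gastropubs",
--     "American (New)", "Tapas Bars", "Tapas/Small Plates",
--     "Juice Bars & Smoothies", "Vegetarian", "Vegan", "Gluten-Free",
--     "Specialty Food", "Organic Stores", "Kombucha", "Acai Bowls",
--     "Distilleries", "Cideries", "Speakeasies", "Whiskey Bars",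
--     "Arts & Entertainment", "Art Galleries", "Music Venues",
--     "Performing Arts", "Festivals", "Art Classes", "Art Schools",
--     "Yoga", "Gyms", "Fitness & Instruction", "Pilates", "Barre Classes",
--     "Trainers", "Boot Camps", "Cycling Classes", "Interval Training Gyms",
--     "Float Spa", "Meditation Centers", "Vintage & Consignment",
--     "Books", "Bookstores", "Vinyl Records", "Shared Office Spaces",
--     "Coffee Roasteries", "Day Spas", "Medical Spas", "Skin Care",
-- ]
--
-- LEGACY_CATS = [
--     "Fast Food", "Burgers", "Chicken Wings", "Chicken Shop", "Hot Dogs",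
--     "Diners", "Buffets", "Food Stands", "Comfort Food", "Sandwiches",
--     "Laundry Services", "Laundromat", "Dry Cleaning & Laundry", "Dry Cleaning",
--     "Convenience Stores", "Discount Store", "Thrift Stores", "Pawn Shops",
--     "Drugstores", "Nail Salons", "Barbers", "Antiques",
--     "Auto Repair", "Tires", "Oil Change Stations", "Auto Parts & Supplies",
--     "Body Shops", "Transmission Repair",
--     "Soul Food", "Southern", "Barbeque", "Mexican", "Latin American",
--     "Caribbean", "Cajun/Creole", "Chinese", "Vietnamese",
--     "Tobacco Shops", "Gas Stations",
-- ]
--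
-- def get_gentrify_scores(timeline):
--     years    = sorted(timeline.keys())
--     gentrify = []
--     legacy   = []
--     for year in years:
--         g = sum(timeline[year].get(cat, 0) for cat in GENTRIFY_CATS)
--         l = sum(timeline[year].get(cat, 0) for cat in LEGACY_CATS)
--         gentrify.append(g)
--         legacy.append(l)
--     return years, gentrify, legacy
-- ===== SOURCE B (Python) =====
-- GENTRIFY_CATS = [
--     "Coffee & Tea", "Cocktail Bars", "Wine Bars", "Wine & Spirits",
--     "Breweries", "Brewpubs", "Beer Bar", "Beer Gardens", "Gastropubs",
--     "American (New)", "Tapas Bars", "Tapas/Small Plates",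
--     "Juice Bars & Smoothies", "Vegetarian", "Vegan", "Gluten-Free",
--     "Specialty Food", "Organic Stores", "Kombucha", "Acai Bowls",
--     "Distilleries", "Cideries", "Speakeasies", "Whiskey Bars",
--     "Arts & Entertainment", "Art Galleries", "Music Venues",
--     "Performing Arts", "Festivals", "Art Classes", "Art Schools",
--     "Yoga", "Gyms", "Fitness & Instruction", "Pilates", "Barre Classes",
--     "Trainers", "Boot Camps", "Cycling Classes", "Interval Training Gyms",
--     "Float Spa", "Meditation Centers", "Vintage & Consignment",
--     "Books", "Bookstores", "Vinyl Records", "Shared Office Spaces",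
--     "Coffee Roasteries", "Day Spas", "Medical Spas", "Skin Care",
-- ]
--
-- LEGACY_CATS = [
--     "Fast Food", "Burgers", "Chicken Wings", "Chicken Shop", "Hot Dogs",
--     "Diners", "Buffets", "Food Stands", "Comfort Food", "Sandwiches",
--     "Laundry Services", "Laundromat", "Dry Cleaning & Laundry", "Dry Cleaning",
--     "Convenience Stores", "Discount Store", "Thrift Stores", "Pawn Shops",
--     "Drugstores", "Nail Salons", "Barbers", "Antiques",
--     "Auto Repair", "Tires", "Oil Change Stations", "Auto Parts & Supplies",
--     "Body Shops", "Transmission Repair",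
--     "Soul Food", "Southern", "Barbeque", "Mexican", "Latin American",
--     "Caribbean", "Cajun/Creole", "Chinese", "Vietnamese",
--     "Tobacco Shops", "Gas Stations",
-- ]
--
-- GENTRIFY_SET = set(GENTRIFY_CATS)
-- LEGACY_SET = set(LEGACY_CATS)
--
-- def get_gentrify_scores(timeline):
--     years = sorted(timeline)
--     gentrify = []
--     legacy = []
--     for year in years:
--         g = 0
--         l = 0
--         for cat, cnt in timeline[year].items():
--             if cat in GENTRIFY_SET:
--                 g += cnt
--             elif cat in LEGACY_SET:
--                 l += cnt
--         gentrify.append(g)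
--         legacy.append(l)
--     return years, gentrify, legacy
-- ===== Notes on version B (the rewrite author's own statement) =====
-- stated objective: faster
-- what changed: Instead of probing the 90 fixed category names against each year's dict, B builds the two category sets once and makes a single pass over each year's own (category, count) items, classifying every entry by set membership.
import Mathlib
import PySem

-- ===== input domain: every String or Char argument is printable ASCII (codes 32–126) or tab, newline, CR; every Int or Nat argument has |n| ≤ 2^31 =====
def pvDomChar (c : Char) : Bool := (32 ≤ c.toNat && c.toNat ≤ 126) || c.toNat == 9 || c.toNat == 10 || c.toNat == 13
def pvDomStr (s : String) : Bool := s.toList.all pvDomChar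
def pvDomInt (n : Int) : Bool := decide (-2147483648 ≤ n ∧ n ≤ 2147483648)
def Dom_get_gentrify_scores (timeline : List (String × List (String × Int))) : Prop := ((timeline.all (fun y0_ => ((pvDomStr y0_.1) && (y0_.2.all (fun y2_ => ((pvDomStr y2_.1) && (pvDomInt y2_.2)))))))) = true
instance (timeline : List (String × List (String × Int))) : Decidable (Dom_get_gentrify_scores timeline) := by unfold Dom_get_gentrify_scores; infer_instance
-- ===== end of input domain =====

-- B replaces the per-year probe of the ~90 fixed category names by one pass over the
-- year's own (category, count) items, classified against the two category sets (objective: faster).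

-- ===== PORT A =====
def GENTRIFY_CATS : List String := [
    "Coffee & Tea", "Cocktail Bars", "Wine Bars", "Wine & Spirits",
    "Breweries", "Brewpubs", "Beer Bar", "Beer Gardens", "Gastropubs",
    "American (New)", "Tapas Bars", "Tapas/Small Plates",
    "Juice Bars & Smoothies", "Vegetarian", "Vegan", "Gluten-Free",
    "Specialty Food", "Organic Stores", "Kombucha", "Acai Bowls",
    "Distilleries", "Cideries", "Speakeasies", "Whiskey Bars",
    "Arts & Entertainment", "Art Galleries", "Music Venues",
    "Performing Arts", "Festivals", "Art Classes", "Art Schools",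
    "Yoga", "Gyms", "Fitness & Instruction", "Pilates", "Barre Classes",
    "Trainers", "Boot Camps", "Cycling Classes", "Interval Training Gyms",
    "Float Spa", "Meditation Centers", "Vintage & Consignment",
    "Books", "Bookstores", "Vinyl Records", "Shared Office Spaces",
    "Coffee Roasteries", "Day Spas", "Medical Spas", "Skin Care"]

def LEGACY_CATS : List String := [
    "Fast Food", "Burgers", "Chicken Wings", "Chicken Shop", "Hot Dogs",
    "Diners", "Buffets", "Food Stands", "Comfort Food", "Sandwiches",
    "Laundry Services", "Laundromat", "Dry Cleaning & Laundry", "Dry Cleaning",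
    "Convenience Stores", "Discount Store", "Thrift Stores", "Pawn Shops",
    "Drugstores", "Nail Salons", "Barbers", "Antiques",
    "Auto Repair", "Tires", "Oil Change Stations", "Auto Parts & Supplies",
    "Body Shops", "Transmission Repair",
    "Soul Food", "Southern", "Barbeque", "Mexican", "Latin American",
    "Caribbean", "Cajun/Creole", "Chinese", "Vietnamese",
    "Tobacco Shops", "Gas Stations"]

-- timeline[year]: 'year' always comes from timeline's keys, so the lookup is 'some';
-- '.getD []' only totalizes the expression and is never hit under the claim.
def get_gentrify_scores (timeline : List (String × List (String × Int))) : List String × List Int × List Int :=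
  let years := PySem.List.sorted (timeline.map Prod.fst) (fun y => y) false
  let gl := years.foldl (fun (acc : List Int × List Int) year =>
    let d := (timeline.lookup year).getD []
    let g := (GENTRIFY_CATS.map (fun cat => ((d.lookup cat).getD 0))).sum
    let l := (LEGACY_CATS.map (fun cat => ((d.lookup cat).getD 0))).sum
    (acc.1 ++ [g], acc.2 ++ [l])) ([], [])
  (years, gl.1, gl.2)

-- ===== PORT B =====
def GENTRIFY_SET : PySem.Set String := PySem.Set.ofList GENTRIFY_CATS
def LEGACY_SET : PySem.Set String := PySem.Set.ofList LEGACY_CATS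

def classifyStep (acc : Int × Int) (kv : String × Int) : Int × Int :=
  if PySem.Set.contains GENTRIFY_SET kv.1 then (acc.1 + kv.2, acc.2)
  else if PySem.Set.contains LEGACY_SET kv.1 then (acc.1, acc.2 + kv.2)
  else acc

def get_gentrify_scores_alt (timeline : List (String × List (String × Int))) : List String × List Int × List Int :=
  let years := PySem.List.sorted (timeline.map Prod.fst) (fun y => y) false
  let gl := years.foldl (fun (acc : List Int × List Int) year =>
    let p := ((timeline.lookup year).getD []).foldl classifyStep (0, 0)
    (acc.1 ++ [p.1], acc.2 ++ [p.2])) ([], [])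
  (years, gl.1, gl.2)

-- ===== PRECONDITION & SPEC =====
-- Pre_ excludes only association lists in which some year's inner category list carries a
-- duplicate key: such a list does not represent any Python dict (a dict cannot hold duplicate
-- keys), and first-match lookup vs. scanning all entries would disagree on it.
def Pre_get_gentrify_scores (timeline : List (String × List (String × Int))) : Prop :=
  ∀ p ∈ timeline, (p.2.map Prod.fst).Nodup
instance (timeline : List (String × List (String × Int))) : Decidable (Pre_get_gentrify_scores timeline) := by unfold Pre_get_gentrify_scores; infer_instance

def pvWitness_get_gentrify_scores : (List (String × List (String × Int))) :=
  [("2020", [("Yoga", 3), ("Fast Food", 2)]), ("2019", [("Vegan", 1)])]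

def Spec_get_gentrify_scores (timeline : List (String × List (String × Int))) (out : List String × List Int × List Int) : Prop := out = get_gentrify_scores_alt timeline
instance (timeline : List (String × List (String × Int))) (out : List String × List Int × List Int) : Decidable (Spec_get_gentrify_scores timeline out) := by unfold Spec_get_gentrify_scores; infer_instance

-- ===== CLAIM (what is proved, stated in full; the proofs are below) =====
def Claim_equal_get_gentrify_scores : Prop := ∀ (timeline : List (String × List (String × Int))), Dom_get_gentrify_scores timeline → Pre_get_gentrify_scores timeline → Spec_get_gentrify_scores timeline (get_gentrify_scores timeline)

-- ===== LEMMAS AND PROOFS =====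

-- A's per-category sum over a dict d, as the expression A computes.
def asum (cats : List String) (d : List (String × Int)) : Int :=
  (cats.map (fun cat => ((d.lookup cat).getD 0))).sum

theorem cats_nodup : GENTRIFY_CATS.Nodup ∧ LEGACY_CATS.Nodup := by decide

theorem cats_disjoint : ∀ k ∈ GENTRIFY_CATS, k ∉ LEGACY_CATS := by decide

theorem sum_map_ite_sum (cats : List String) (k : String) (v : Int) (f : String → Int)
    (hnd : cats.Nodup) (hf : f k = 0) :
    (cats.map fun c => if c = k then v else f c).sum
      = (if k ∈ cats then v else 0) + (cats.map f).sum := by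
  induction cats with
  | nil => simp
  | cons c cs ih =>
    rcases List.nodup_cons.mp hnd with ⟨hc, hcs⟩
    simp only [List.map_cons, List.sum_cons]
    rw [ih hcs]
    by_cases h : c = k
    · subst h
      rw [if_pos rfl, if_neg hc, if_pos (List.mem_cons_self), hf]
    · rw [if_neg h]
      by_cases hk : k ∈ cs
      · rw [if_pos hk, if_pos (List.mem_cons_of_mem c hk)]
        ring
      · rw [if_neg hk, if_neg (by simp [Ne.symm h, hk])]
        ring

theorem lookup_cons_eq_ite {ν : Type} (k c : String) (v : ν) (d : List (String × ν)) :
    ((c, v) :: d).lookup k = if k = c then some v else d.lookup k := by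
  by_cases h : k = c
  · simp [List.lookup, h]
  · have hb : (k == c) = false := beq_eq_false_iff_ne.mpr h
    simp [List.lookup, hb, h]

theorem lookup_eq_none_of_not_key (d : List (String × Int)) (k : String)
    (h : k ∉ d.map Prod.fst) : d.lookup k = none := by
  induction d with
  | nil => rfl
  | cons p d ih =>
    simp only [List.map_cons, List.mem_cons, not_or] at h
    obtain ⟨c, v⟩ := p
    rw [lookup_cons_eq_ite, if_neg h.1]
    exact ih h.2

theorem mem_of_lookup_some {ν : Type} (tl : List (String × ν)) (y : String) (d : ν)
    (h : tl.lookup y = some d) : (y, d) ∈ tl := by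
  induction tl with
  | nil => simp [List.lookup] at h
  | cons p tl ih =>
    obtain ⟨k, v⟩ := p
    rw [lookup_cons_eq_ite] at h
    by_cases hk : y = k
    · rw [if_pos hk] at h
      simp only [Option.some.injEq] at h
      subst hk; subst h
      exact List.mem_cons_self
    · rw [if_neg hk] at h
      exact List.mem_cons_of_mem _ (ih h)

theorem asum_cons (cats : List String) (k : String) (v : Int) (d : List (String × Int))
    (hnd : cats.Nodup) (hk : d.lookup k = none) :
    asum cats ((k, v) :: d) = (if k ∈ cats then v else 0) + asum cats d := by
  unfold asum
  have : (cats.map fun cat => ((((k, v) :: d).lookup cat).getD 0))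
       = (cats.map fun cat => if cat = k then v else ((d.lookup cat).getD 0)) := by
    apply List.map_congr_left
    intro c _
    rw [lookup_cons_eq_ite]
    by_cases h : c = k <;> simp [h]
  rw [this]
  exact sum_map_ite_sum cats k v _ hnd (by rw [hk]; rfl)

theorem mem_set_iff_mem_gentrify (k : String) : k ∈ GENTRIFY_SET ↔ k ∈ GENTRIFY_CATS := by
  simp [GENTRIFY_SET, PySem.Set.mem_ofList]

theorem mem_set_iff_mem_legacy (k : String) : k ∈ LEGACY_SET ↔ k ∈ LEGACY_CATS := by
  simp [LEGACY_SET, PySem.Set.mem_ofList]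

theorem classify_foldl (d : List (String × Int)) (hnd : (d.map Prod.fst).Nodup) :
    ∀ g l : Int, d.foldl classifyStep (g, l) = (g + asum GENTRIFY_CATS d, l + asum LEGACY_CATS d) := by
  induction d with
  | nil => intro g l; simp [asum]
  | cons p d ih =>
    intro g l
    obtain ⟨k, v⟩ := p
    simp only [List.map_cons, List.nodup_cons] at hnd
    have hkd : d.lookup k = none := lookup_eq_none_of_not_key d k hnd.1
    have hG := asum_cons GENTRIFY_CATS k v d cats_nodup.1 hkd
    have hL := asum_cons LEGACY_CATS k v d cats_nodup.2 hkd
    simp only [List.foldl_cons]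
    by_cases hg : k ∈ GENTRIFY_CATS
    · have hl : k ∉ LEGACY_CATS := cats_disjoint k hg
      rw [show classifyStep (g, l) (k, v) = (g + v, l) by
            simp [classifyStep, PySem.Set.contains, (mem_set_iff_mem_gentrify k).mpr hg]]
      rw [ih hnd.2, hG, hL, if_pos hg, if_neg hl]
      rw [Prod.mk.injEq]
      exact ⟨by ring, by ring⟩
    · have hg' : k ∉ GENTRIFY_SET := fun h => hg ((mem_set_iff_mem_gentrify k).mp h)
      by_cases hl : k ∈ LEGACY_CATS
      · rw [show classifyStep (g, l) (k, v) = (g, l + v) by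
              simp [classifyStep, PySem.Set.contains, hg', (mem_set_iff_mem_legacy k).mpr hl]]
        rw [ih hnd.2, hG, hL, if_neg hg, if_pos hl]
        rw [Prod.mk.injEq]
        exact ⟨by ring, by ring⟩
      · have hl' : k ∉ LEGACY_SET := fun h => hl ((mem_set_iff_mem_legacy k).mp h)
        rw [show classifyStep (g, l) (k, v) = (g, l) by
              simp [classifyStep, PySem.Set.contains, hg', hl']]
        rw [ih hnd.2, hG, hL, if_neg hg, if_neg hl]
        simp

theorem inner_nodup (timeline : List (String × List (String × Int)))
    (hpre : Pre_get_gentrify_scores timeline) (year : String) :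
    (((timeline.lookup year).getD []).map Prod.fst).Nodup := by
  cases h : timeline.lookup year with
  | none => simp
  | some d =>
    have hm : (year, d) ∈ timeline := mem_of_lookup_some timeline year d h
    simpa using hpre (year, d) hm

-- ===== VERDICT (by name: the statement is the Claim_ definition above) =====
theorem get_gentrify_scores_spec : Claim_equal_get_gentrify_scores := by
  intro timeline _ hpre
  unfold Spec_get_gentrify_scores get_gentrify_scores get_gentrify_scores_alt
  simp only []
  have hstep : ∀ (acc : List Int × List Int) (year : String),
      (fun (acc : List Int × List Int) year =>
        let d := (timeline.lookup year).getD []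
        let g := (GENTRIFY_CATS.map (fun cat => ((d.lookup cat).getD 0))).sum
        let l := (LEGACY_CATS.map (fun cat => ((d.lookup cat).getD 0))).sum
        (acc.1 ++ [g], acc.2 ++ [l])) acc year
    = (fun (acc : List Int × List Int) year =>
        let p := ((timeline.lookup year).getD []).foldl classifyStep (0, 0)
        (acc.1 ++ [p.1], acc.2 ++ [p.2])) acc year := by
    intro acc year
    have := classify_foldl ((timeline.lookup year).getD []) (inner_nodup timeline hpre year) 0 0
    simp only [this, zero_add]
    rfl
  rw [funext fun acc => funext fun year => hstep acc year]
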